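-- pv_equiv track=rewrite | github.com/DataInMotion/avatar-modelrepo | de.avatar.mr.vaadin/data/suggester/py/utils.py | divideVariableName
-- ===== SOURCE A (Python) =====
-- def divideVariableName(text):
--     upperCaseIndexes = []
--     textParts = ""
--     for c in range(0, len(text)):
--         if checkupper(text[c]):
--             upperCaseIndexes.append(c)
--     start = 0
--     for i in upperCaseIndexes:
--         part = text[start:i]
--         start = i
--         textParts = textParts + " " + part.lower()
--     part = text[start:len(text)]
--     textParts = textParts + " " + part.lower()
--     return textParts
--
-- def checkupper(str):
--    if ord(str) < 96 :
--       return True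
--    return False
-- ===== SOURCE B (Python) =====
-- def divideVariableName(text):
--     # Single streaming pass: flush the running chunk whenever a "boundary"
--     # character (ord < 96) starts a new part; join with a leading space each.
--     parts = []
--     current = ""
--     for ch in text:
--         if checkupper(ch):
--             parts.append(current)
--             current = ch
--         else:
--             current += ch
--     parts.append(current)
--     return ''.join(' ' + p.lower() for p in parts)
--
-- def checkupper(str):
--     if ord(str) < 96:
--         return True
--     return False
-- ===== Notes on version B (the rewrite author's own statement) =====
-- stated objective: simpler
-- what changed: Replaces the two-phase algorithm (collect all boundary indices into a list, then re-slice the string between consecutive indices) with a single streaming pass that keeps a running chunk and flushes it at each boundary character, joining the lowercased chunks each prefixed with a space.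
import Mathlib
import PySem

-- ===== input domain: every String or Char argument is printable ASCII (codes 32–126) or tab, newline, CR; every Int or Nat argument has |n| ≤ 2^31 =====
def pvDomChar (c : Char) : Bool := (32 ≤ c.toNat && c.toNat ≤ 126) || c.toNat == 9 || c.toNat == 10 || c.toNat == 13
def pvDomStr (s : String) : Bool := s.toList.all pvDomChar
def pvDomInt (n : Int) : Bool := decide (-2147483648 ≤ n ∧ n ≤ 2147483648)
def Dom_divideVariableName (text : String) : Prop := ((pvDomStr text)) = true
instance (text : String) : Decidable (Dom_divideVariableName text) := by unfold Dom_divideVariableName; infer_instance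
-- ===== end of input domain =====

-- B replaces A's two-phase index-collect-then-slice algorithm with a single streaming
-- pass that flushes a running chunk at each boundary character (objective: simpler).


-- ===== PORT A =====
-- ord(str) < 96 on the single character
def checkupper (c : Char) : Bool := c.toNat < 96

def divideVariableName (text : String) : String :=
  let l := text.toList
  -- for c in range(0, len(text)): if checkupper(text[c]): upperCaseIndexes.append(c)
  let upperCaseIndexes : List Int :=
    (PySem.List.pyRange 0 (l.length : Int) 1).foldl
      (fun acc c => if checkupper (PySem.List.pyGetD l c ' ') then acc ++ [c] else acc) []
  -- for i in upperCaseIndexes: part = text[start:i]; start = i; textParts += " " + part.lower()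
  let st : Int × List Char :=
    upperCaseIndexes.foldl
      (fun st i => (i, st.2 ++ ' ' :: PySem.Chars.lower (PySem.List.slice l (some st.1) (some i))))
      ((0 : Int), ([] : List Char))
  -- part = text[start:len(text)]; textParts += " " + part.lower()
  String.ofList (st.2 ++ ' ' :: PySem.Chars.lower (PySem.List.slice l (some st.1) (some (l.length : Int))))

-- ===== PORT B =====
def divideVariableName_alt (text : String) : String :=
  -- for ch in text: if checkupper(ch): parts.append(current); current = ch else current += ch
  let st : List (List Char) × List Char :=
    text.toList.foldl
      (fun st c => if checkupper c then (st.1 ++ [st.2], [c]) else (st.1, st.2 ++ [c]))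
      (([] : List (List Char)), ([] : List Char))
  -- parts.append(current); return ''.join(' ' + p.lower() for p in parts)
  String.ofList (((st.1 ++ [st.2]).map (fun p => ' ' :: PySem.Chars.lower p)).flatten)

-- ===== PRECONDITION & SPEC =====
def Spec_divideVariableName (text : String) (out : String) : Prop := out = divideVariableName_alt text
instance (text : String) (out : String) : Decidable (Spec_divideVariableName text out) := by unfold Spec_divideVariableName; infer_instance

-- ===== CLAIM (what is proved, stated in full; the proofs are below) =====
def Claim_equal_divideVariableName : Prop := ∀ (text : String), Dom_divideVariableName text → Spec_divideVariableName text (divideVariableName text)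

-- ===== LEMMAS AND PROOFS =====

-- first segment / remaining segments of the grouping both programs compute
def segs : List Char → List Char × List (List Char)
  | [] => ([], [])
  | c :: t =>
    let p := segs t
    if checkupper c then ([], (c :: p.1) :: p.2) else (c :: p.1, p.2)

-- the boundary positions, as Nat indices
def specIdxs : List Char → List Nat
  | [] => []
  | c :: t => if checkupper c then 0 :: (specIdxs t).map (· + 1) else (specIdxs t).map (· + 1)

def sliceN (l : List Char) (a b : Nat) : List Char := (l.drop a).take (b - a)

-- A's second loop plus the trailing slice, on Nat indices
def runA (l : List Char) : List Nat → Nat → List Char → List Char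
  | [], s, acc => acc ++ ' ' :: PySem.Chars.lower (sliceN l s l.length)
  | i :: is, s, acc => runA l is i (acc ++ ' ' :: PySem.Chars.lower (sliceN l s i))

theorem specIdxs_eq (l : List Char) :
    (List.range l.length).filter (fun k => checkupper (l.getD k ' ')) = specIdxs l := by
  induction l with
  | nil => rfl
  | cons c t ih =>
    simp only [List.length_cons, List.range_succ_eq_map, List.filter_cons, List.filter_map,
      specIdxs]
    have : ((fun k => checkupper ((c :: t).getD k ' ')) ∘ Nat.succ)
        = fun k => checkupper (t.getD k ' ') := by
      funext k; rfl
    rw [this, ih]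
    by_cases h : checkupper c
    · simp [h, List.getD]
    · simp [h, List.getD]

theorem idxs_eq (l : List Char) :
    (PySem.List.pyRange 0 (l.length : Int) 1).foldl
      (fun acc c => if checkupper (PySem.List.pyGetD l c ' ') then acc ++ [c] else acc) []
    = (specIdxs l).map (fun k => (k : Int)) := by
  have h1 := PySem.List.foldl_append_if (fun c => checkupper (PySem.List.pyGetD l c ' '))
      (fun c => c) (PySem.List.pyRange 0 (l.length : Int) 1) []
  simp only [List.map_id'] at h1
  rw [h1, PySem.List.pyRange_zero_natCast, List.filter_map]
  have : ((fun c => checkupper (PySem.List.pyGetD l c ' ')) ∘ fun k : Nat => (k : Int))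
      = fun k => checkupper (l.getD k ' ') := by
    funext k; simp [PySem.List.pyGetD_natCast]
  rw [this, specIdxs_eq]
  simp only [List.map_id']
  induction specIdxs l with
  | nil => rfl
  | cons a t ih => simp_all [List.flatMap]

-- bridge: A's Int fold equals runA on Nat data
theorem foldA_eq (l : List Char) (is : List Nat) (s : Nat) (acc : List Char) :
    ((is.map (fun k => (k : Int))).foldl
        (fun st i => (i, st.2 ++ ' ' :: PySem.Chars.lower (PySem.List.slice l (some st.1) (some i))))
        ((s : Int), acc)).2
      ++ ' ' :: PySem.Chars.lower (PySem.List.slice l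
        (some ((is.map (fun k => (k : Int))).foldl
          (fun st i => (i, st.2 ++ ' ' :: PySem.Chars.lower (PySem.List.slice l (some st.1) (some i))))
          ((s : Int), acc)).1) (some (l.length : Int)))
    = runA l is s acc := by
  induction is generalizing s acc with
  | nil => simp [runA, PySem.List.slice_natCast, sliceN]
  | cons i is ih => simpa [runA, PySem.List.slice_natCast, sliceN] using ih i _

theorem sliceN_shift (p m : List Char) (a b : Nat) :
    sliceN (p ++ m) (a + p.length) (b + p.length) = sliceN m a b := by
  unfold sliceN
  rw [List.drop_append, List.drop_eq_nil_of_le (by omega : p.length ≤ a + p.length)]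
  simp only [List.nil_append, Nat.add_sub_cancel]
  congr 1
  omega

theorem runA_shift (p m : List Char) (is : List Nat) (s : Nat) (acc : List Char) :
    runA (p ++ m) (is.map (· + p.length)) (s + p.length) acc = runA m is s acc := by
  induction is generalizing s acc with
  | nil =>
    simp only [List.map_nil, runA]
    rw [show (p ++ m).length = m.length + p.length by simp [Nat.add_comm], sliceN_shift]
  | cons i is ih =>
    simp only [List.map_cons, runA]
    rw [sliceN_shift, ih]

def flatParts (r : List (List Char)) : List Char :=
  r.flatMap (fun q => ' ' :: PySem.Chars.lower q)

theorem runA_main (t p acc : List Char) :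
    runA (p ++ t) ((specIdxs t).map (· + p.length)) 0 acc
      = acc ++ (' ' :: PySem.Chars.lower (p ++ (segs t).1)) ++ flatParts (segs t).2 := by
  induction t generalizing p acc with
  | nil =>
    simp [runA, segs, specIdxs, sliceN, flatParts]
  | cons d t' ih =>
    by_cases hd : checkupper d
    · simp only [specIdxs, segs, hd, if_pos, List.map_cons, runA, Nat.zero_add]
      rw [show sliceN (p ++ d :: t') 0 p.length = p by
        simp [sliceN]]
      have hsh := runA_shift p (d :: t') ((specIdxs t').map (· + 1)) 0
        (acc ++ ' ' :: PySem.Chars.lower p)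
      simp only [Nat.zero_add] at hsh
      rw [hsh]
      have := ih [d] (acc ++ ' ' :: PySem.Chars.lower p)
      simp only [List.length_cons, List.length_nil, Nat.zero_add, List.singleton_append] at this
      rw [this]
      simp [flatParts, PySem.Chars.lower]
    · simp only [specIdxs, segs, hd, if_neg, Bool.false_eq_true, not_false_iff]
      have hmap : ((specIdxs t').map (· + 1)).map (· + p.length)
          = (specIdxs t').map (· + (p ++ [d]).length) := by
        rw [List.map_map]
        exact List.map_congr_left (fun a _ => by simp; omega)
      rw [show p ++ d :: t' = (p ++ [d]) ++ t' by simp, hmap, ih (p ++ [d]) acc]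
      simp

theorem foldB_eq (l : List Char) (parts : List (List Char)) (cur : List Char) :
    (l.foldl (fun st c => if checkupper c then (st.1 ++ [st.2], [c]) else (st.1, st.2 ++ [c]))
        (parts, cur)).1
      ++ [(l.foldl (fun st c => if checkupper c then (st.1 ++ [st.2], [c]) else (st.1, st.2 ++ [c]))
        (parts, cur)).2]
    = parts ++ (cur ++ (segs l).1) :: (segs l).2 := by
  induction l generalizing parts cur with
  | nil => simp [segs]
  | cons c t ih =>
    by_cases hc : checkupper c
    · simp only [List.foldl_cons, hc, if_pos, segs]
      rw [ih]
      simp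
    · simp only [List.foldl_cons, hc, if_neg, Bool.false_eq_true, not_false_iff, segs]
      rw [ih]
      simp

-- ===== VERDICT (by name: the statement is the Claim_ definition above) =====
theorem divideVariableName_spec : Claim_equal_divideVariableName := by
  intro text _
  show divideVariableName text = divideVariableName_alt text
  unfold divideVariableName divideVariableName_alt
  dsimp only
  set l := text.toList with hl
  rw [idxs_eq l]
  rw [show ((0 : Int), ([] : List Char)) = (((0 : Nat) : Int), ([] : List Char)) by norm_num]
  rw [foldA_eq l (specIdxs l) 0 []]
  have hA : runA l ((specIdxs l).map (· + ([] : List Char).length)) 0 []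
      = [] ++ (' ' :: PySem.Chars.lower ([] ++ (segs l).1)) ++ flatParts (segs l).2 :=
    runA_main l [] []
  simp only [List.length_nil, Nat.add_zero, List.map_id', List.nil_append] at hA
  rw [hA, foldB_eq l [] []]
  simp [flatParts, List.flatMap]
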